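-- pv_equiv track=rewrite | github.com/Shayan-Bhowmik/image-processing-mri | src/dataset/input_transforms.py | build_patient_index
-- ===== SOURCE A (Python) =====
-- from typing import Dict, List, Optional, Tuple
--
-- def build_patient_index(dataset: List[Dict]) -> Dict[str, List[Dict]]:
--
--     patient_index = {}
--
--     for record in dataset:
--         pid = record["patient_id"]
--
--         if pid not in patient_index:
--             patient_index[pid] = []
--
--         patient_index[pid].append(record)
--
--     for pid in patient_index:
--         patient_index[pid].sort(key=lambda x: x["slice_index"])
--
--     return patient_index
-- ===== SOURCE B (Python) =====
-- def build_patient_index(dataset):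
--     # Keys in first-appearance order, each starting empty.
--     index = {record["patient_id"]: [] for record in dataset}
--     # One global stable sort by slice_index; a single grouping pass then
--     # leaves every per-patient list sorted with original tie order kept.
--     for record in sorted(dataset, key=lambda r: r["slice_index"]):
--         index[record["patient_id"]].append(record)
--     return index
-- ===== Notes on version B (the rewrite author's own statement) =====
-- stated objective: simpler
-- what changed: Instead of grouping first and then sorting each per-patient list, B does one global stable sort by slice_index and then a single grouping pass (keys pre-seeded in first-appearance order), relying on sort stability to leave every group sorted with A's tie order.
import Mathlib
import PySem

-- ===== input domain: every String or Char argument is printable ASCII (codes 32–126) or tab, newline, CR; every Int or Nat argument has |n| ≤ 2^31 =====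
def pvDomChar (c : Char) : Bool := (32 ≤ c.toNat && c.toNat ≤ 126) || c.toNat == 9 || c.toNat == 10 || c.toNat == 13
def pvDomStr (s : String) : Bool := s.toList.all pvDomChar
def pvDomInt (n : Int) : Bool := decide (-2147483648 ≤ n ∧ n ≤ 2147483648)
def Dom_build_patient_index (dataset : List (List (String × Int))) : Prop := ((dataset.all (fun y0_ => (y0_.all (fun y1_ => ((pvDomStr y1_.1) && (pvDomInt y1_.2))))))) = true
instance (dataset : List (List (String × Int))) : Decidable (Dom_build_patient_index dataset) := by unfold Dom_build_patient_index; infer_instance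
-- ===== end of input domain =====

-- B groups with ONE global stable sort by slice_index followed by a single
-- appending pass, instead of A's group-first-then-sort-each-group; same result.

-- record["patient_id"] / record["slice_index"] (value when present; Pre_ guarantees presence)
def pvPid (r : List (String × Int)) : Int := ((PySem.Dict.mk r).get? "patient_id").getD 0
def pvSlice (r : List (String × Int)) : Int := ((PySem.Dict.mk r).get? "slice_index").getD 0

-- ===== PORT A =====
def build_patient_index (dataset : List (List (String × Int))) : List (Int × List (List (String × Int))) :=
  -- first loop: group records by patient_id (insert empty list on first sight, then append)
  let d1 := dataset.foldl (fun d r =>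
    let pid := pvPid r
    let d := if d.contains pid then d else d.insert pid ([] : List (List (String × Int)))
    d.insert pid (d.getD pid [] ++ [r])) PySem.Dict.empty
  -- second loop: for pid in patient_index: sort the group in place by slice_index
  let d2 := d1.keys.foldl (fun d pid =>
    d.insert pid (PySem.List.sorted (d.getD pid []) pvSlice)) d1
  d2.items

-- ===== PORT B =====
def build_patient_index_alt (dataset : List (List (String × Int))) : List (Int × List (List (String × Int))) :=
  -- keys in first-appearance order, each starting empty
  let index := dataset.foldl (fun d r => d.insert (pvPid r) ([] : List (List (String × Int)))) PySem.Dict.empty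
  -- one global stable sort, then a single grouping pass
  let index := (PySem.List.sorted dataset pvSlice).foldl
    (fun d r => d.insert (pvPid r) (d.getD (pvPid r) [] ++ [r])) index
  index.items

-- ===== PRECONDITION & SPEC =====
-- Pre_ excludes exactly the inputs where the Python A raises KeyError: a record
-- missing the "patient_id" or the "slice_index" key (B raises there too).
def Pre_build_patient_index (dataset : List (List (String × Int))) : Prop :=
  ∀ r ∈ dataset, (PySem.Dict.mk r).contains "patient_id" = true ∧ (PySem.Dict.mk r).contains "slice_index" = true
instance (dataset : List (List (String × Int))) : Decidable (Pre_build_patient_index dataset) := by unfold Pre_build_patient_index; infer_instance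
def pvWitness_build_patient_index : (List (List (String × Int))) :=
  [[("patient_id", 1), ("slice_index", 2)], [("patient_id", 1), ("slice_index", 0)]]
def Spec_build_patient_index (dataset : List (List (String × Int))) (out : List (Int × List (List (String × Int)))) : Prop := out = build_patient_index_alt dataset
instance (dataset : List (List (String × Int))) (out : List (Int × List (List (String × Int)))) : Decidable (Spec_build_patient_index dataset out) := by unfold Spec_build_patient_index; infer_instance

-- ===== CLAIM (what is proved, stated in full; the proofs are below) =====
def Claim_equal_build_patient_index : Prop := ∀ (dataset : List (List (String × Int))), Dom_build_patient_index dataset → Pre_build_patient_index dataset → Spec_build_patient_index dataset (build_patient_index dataset)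

-- ===== LEMMAS AND PROOFS =====

-- abbreviation for the stable-insertion step of PySem.List.sorted with key pvSlice
def pvIns (x : List (String × Int)) (acc : List (List (String × Int))) : List (List (String × Int)) :=
  PySem.List.insertBy (fun a b => decide (pvSlice a < pvSlice b)) x acc

lemma pvIns_of_forall_lt (x : List (String × Int)) (zs : List (List (String × Int)))
    (h : ∀ z ∈ zs, pvSlice x < pvSlice z) : pvIns x zs = x :: zs := by
  cases zs with
  | nil => rfl
  | cons z t => simp [pvIns, PySem.List.insertBy, h z (by simp)]

-- filtering commutes with one stable insertion into a key-sorted list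
lemma filter_pvIns (p : List (String × Int) → Bool) (x : List (String × Int)) :
    ∀ ys : List (List (String × Int)), ys.Pairwise (fun a b => pvSlice a ≤ pvSlice b) →
    (pvIns x ys).filter p = if p x then pvIns x (ys.filter p) else ys.filter p := by
  intro ys
  induction ys with
  | nil => intro _; by_cases hx : p x <;> simp [pvIns, PySem.List.insertBy, List.filter, hx]
  | cons y t ih =>
    intro hp
    rw [List.pairwise_cons] at hp
    by_cases hxy : pvSlice x < pvSlice y
    · have hstep : pvIns x (y :: t) = x :: y :: t := by simp [pvIns, PySem.List.insertBy, hxy]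
      rw [hstep]
      by_cases hx : p x
      · have : pvIns x ((y :: t).filter p) = x :: (y :: t).filter p := by
          apply pvIns_of_forall_lt
          intro z hz
          have hz' : z ∈ y :: t := List.mem_of_mem_filter hz
          rcases List.mem_cons.mp hz' with h | h
          · exact h ▸ hxy
          · exact lt_of_lt_of_le hxy (hp.1 z h)
        simp [hx, this]
      · simp [hx]
    · have hstep : pvIns x (y :: t) = y :: pvIns x t := by simp [pvIns, PySem.List.insertBy, hxy]
      rw [hstep]
      have iht := ih hp.2
      have hins : ∀ zs, pvIns x (y :: zs) = y :: pvIns x zs := fun zs => by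
        simp [pvIns, PySem.List.insertBy, hxy]
      by_cases hy : p y <;> by_cases hx : p x <;>
        simp [hy, hx, iht, hins]

lemma filter_foldl_pvIns (p : List (String × Int) → Bool) :
    ∀ (l : List (List (String × Int))) (acc : List (List (String × Int))),
    acc.Pairwise (fun a b => pvSlice a ≤ pvSlice b) →
    (l.foldl (fun acc x => pvIns x acc) acc).filter p
      = (l.filter p).foldl (fun acc x => pvIns x acc) (acc.filter p) := by
  intro l
  induction l with
  | nil => intro acc _; rfl
  | cons x t ih =>
    intro acc hp
    have hp' : (pvIns x acc).Pairwise (fun a b => pvSlice a ≤ pvSlice b) :=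
      PySem.List.insertBy_pairwise_le pvSlice x acc hp
    by_cases hx : p x
    · simp only [List.foldl_cons, List.filter_cons, hx, ih _ hp', filter_pvIns p x acc hp]
      simp
    · simp only [List.foldl_cons, List.filter_cons, hx, ih _ hp', filter_pvIns p x acc hp]
      simp

-- stability: a stable global sort then filter = filter then stable sort
lemma sorted_filter (p : List (String × Int) → Bool) (l : List (List (String × Int))) :
    (PySem.List.sorted l pvSlice).filter p = PySem.List.sorted (l.filter p) pvSlice := by
  rw [PySem.List.sorted_eq_foldl_insertBy l pvSlice, PySem.List.sorted_eq_foldl_insertBy (l.filter p) pvSlice]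
  have := filter_foldl_pvIns p l [] (by simp)
  simpa [pvIns] using this

-- A's first-loop body is exactly a modify step
lemma stepA_eq (d : PySem.Dict Int (List (List (String × Int)))) (r : List (String × Int)) :
    (let pid := pvPid r
     let d' := if d.contains pid then d else d.insert pid ([] : List (List (String × Int)))
     d'.insert pid (d'.getD pid [] ++ [r]))
    = d.modify (pvPid r) [] (· ++ [r]) := by
  by_cases h : d.contains (pvPid r)
  · simp [h, PySem.Dict.modify]
  · simp only [if_neg h]
    have hg : d.getD (pvPid r) ([] : List (List (String × Int))) = [] :=
      PySem.Dict.getD_of_not_contains d [] (by simpa using h)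
    rw [PySem.Dict.getD_insert_self, PySem.Dict.insert_insert_self, PySem.Dict.modify, hg]

-- the grouping fold, characterised: lookups are filters
lemma groupD (l : List (List (String × Int))) (d : PySem.Dict Int (List (List (String × Int)))) (pid : Int) :
    (l.foldl (fun d r => d.modify (pvPid r) [] (· ++ [r])) d).getD pid []
      = d.getD pid [] ++ l.filter (fun r => pvPid r == pid) := by
  have h := PySem.Dict.getD_foldl_modify_append (l.map (fun r => (pvPid r, r))) d pid
  rw [List.foldl_map] at h
  rw [h, List.filter_map]
  simp [Function.comp_def]

-- A's second loop: value at each visited key becomes its sorted group, keys unchanged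
lemma sortLoop_getD (ks : List Int) : ∀ (d : PySem.Dict Int (List (List (String × Int)))),
    ks.Nodup → ∀ j : Int,
    (ks.foldl (fun d k => d.insert k (PySem.List.sorted (d.getD k []) pvSlice)) d).getD j []
      = if j ∈ ks then PySem.List.sorted (d.getD j []) pvSlice else d.getD j [] := by
  induction ks with
  | nil => intro d _ j; simp
  | cons k t ih =>
    intro d hnd j
    rw [List.nodup_cons] at hnd
    simp only [List.foldl_cons]
    rw [ih _ hnd.2 j]
    by_cases hjt : j ∈ t
    · have hjk : j ≠ k := fun h => hnd.1 (h ▸ hjt)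
      simp [hjt, PySem.Dict.getD_insert, hjk]
    · by_cases hjk : j = k
      · subst hjk; simp [hjt]
      · simp [hjt, hjk, PySem.Dict.getD_insert]

lemma sortLoop_keys (ks : List Int) : ∀ (d : PySem.Dict Int (List (List (String × Int)))),
    (∀ k ∈ ks, d.contains k = true) →
    (ks.foldl (fun d k => d.insert k (PySem.List.sorted (d.getD k []) pvSlice)) d).keys = d.keys := by
  induction ks with
  | nil => intro d _; rfl
  | cons k t ih =>
    intro d h
    simp only [List.foldl_cons]
    rw [ih _ (fun k' hk' => by
      rw [PySem.Dict.contains_insert]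
      simp [h k' (List.mem_cons_of_mem _ hk')]),
      PySem.Dict.keys_insert_of_contains _ _ (h k (by simp))]

-- updating a set with elements it already has leaves it unchanged
lemma set_update_of_subset (xs : List Int) : ∀ s : PySem.Set Int, (∀ x ∈ xs, x ∈ s) →
    PySem.Set.update s xs = s := by
  induction xs with
  | nil => intro s _; rfl
  | cons x t ih =>
    intro s h
    show PySem.Set.update (PySem.Set.add s x) t = s
    rw [PySem.Set.add_of_mem (h x (by simp)), ih s (fun y hy => h y (List.mem_cons_of_mem _ hy))]

-- B's first fold: every lookup is []
lemma d0_getD (l : List (List (String × Int))) : ∀ (d : PySem.Dict Int (List (List (String × Int)))),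
    (∀ j : Int, d.getD j [] = []) → ∀ j : Int,
    (l.foldl (fun d r => d.insert (pvPid r) ([] : List (List (String × Int)))) d).getD j [] = [] := by
  induction l with
  | nil => intro d h j; exact h j
  | cons r t ih =>
    intro d h j
    simp only [List.foldl_cons]
    exact ih _ (fun j' => by rw [PySem.Dict.getD_insert]; split <;> simp [h]) j

-- ===== VERDICT (by name: the statement is the Claim_ definition above) =====
theorem build_patient_index_spec : Claim_equal_build_patient_index := by
  intro dataset _ _
  unfold Spec_build_patient_index build_patient_index build_patient_index_alt
  simp only []
  -- normalise A's first loop to the modify form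
  have hA1 : dataset.foldl (fun d r =>
      let pid := pvPid r
      let d := if d.contains pid then d else d.insert pid ([] : List (List (String × Int)))
      d.insert pid (d.getD pid [] ++ [r])) PySem.Dict.empty
      = dataset.foldl (fun d r => d.modify (pvPid r) [] (· ++ [r])) PySem.Dict.empty := by
    congr 1
    funext d r
    exact stepA_eq d r
  rw [hA1]
  set D1 := dataset.foldl (fun d r => d.modify (pvPid r) [] (· ++ [r])) PySem.Dict.empty with hD1
  set d0 := dataset.foldl (fun d r => d.insert (pvPid r) ([] : List (List (String × Int)))) PySem.Dict.empty with hd0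
  -- keys
  have hKD1 : D1.keys = PySem.Set.ofList (dataset.map pvPid) := by
    rw [hD1, PySem.Dict.keys_foldl_modify_key dataset pvPid [] (fun _ r _ => _ ++ [r])]
    simp [PySem.Set.ofList_eq_foldl, PySem.Set.update, PySem.Dict.keys_empty]
  have hKd0 : d0.keys = PySem.Set.ofList (dataset.map pvPid) := by
    rw [hd0, PySem.Dict.keys_foldl_insert_key dataset pvPid (fun _ _ => [])]
    simp [PySem.Set.ofList_eq_foldl, PySem.Set.update, PySem.Dict.keys_empty]
  have hndD1 : D1.keys.Nodup := by
    rw [hD1]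
    exact PySem.Dict.nodup_keys_foldl_modify_key dataset pvPid [] _ _ PySem.Dict.nodup_keys_empty
  -- B's final dict (second fold is definitionally a modify fold)
  set ds' := PySem.List.sorted dataset pvSlice with hds'
  have hBstep : (fun (d : PySem.Dict Int (List (List (String × Int)))) r =>
      d.insert (pvPid r) (d.getD (pvPid r) [] ++ [r]))
      = fun d r => d.modify (pvPid r) [] (· ++ [r]) := rfl
  rw [hBstep]
  set B2 := ds'.foldl (fun d r => d.modify (pvPid r) [] (· ++ [r])) d0 with hB2
  have hKB2 : B2.keys = D1.keys := by
    rw [hB2, PySem.Dict.keys_foldl_modify_key ds' pvPid [] (fun _ r _ => _ ++ [r]), hKd0, hKD1]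
    apply set_update_of_subset
    intro x hx
    rw [PySem.Set.mem_ofList]
    rcases List.mem_map.mp hx with ⟨r, hr, hrx⟩
    exact List.mem_map.mpr ⟨r, (PySem.List.sorted_perm dataset pvSlice false).mem_iff.mp hr, hrx⟩
  have hndB2 : B2.keys.Nodup := hKB2 ▸ hndD1
  -- A's final dict
  set A2 := D1.keys.foldl (fun d pid => d.insert pid (PySem.List.sorted (d.getD pid []) pvSlice)) D1 with hA2
  have hKA2 : A2.keys = D1.keys := by
    rw [hA2]
    exact sortLoop_keys D1.keys D1 (fun k hk => (PySem.Dict.contains_iff_mem_keys D1 k).mpr hk)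
  have hndA2 : A2.keys.Nodup := hKA2 ▸ hndD1
  -- items of both, keywise
  rw [PySem.Dict.items_eq_map_keys A2 hndA2 [], PySem.Dict.items_eq_map_keys B2 hndB2 [],
    hKA2, hKB2]
  apply List.map_congr_left
  intro k hk
  have hAk : A2.getD k [] = PySem.List.sorted (D1.getD k []) pvSlice := by
    rw [hA2, sortLoop_getD D1.keys D1 hndD1 k, if_pos hk]
  have hD1k : D1.getD k [] = dataset.filter (fun r => pvPid r == k) := by
    rw [hD1, groupD]
    simp
  have hBk : B2.getD k [] = ds'.filter (fun r => pvPid r == k) := by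
    rw [hB2, groupD, d0_getD dataset PySem.Dict.empty (fun j => by simp) k]
    simp
  rw [hAk, hD1k, hBk, hds', ← sorted_filter]
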